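-- pv_equiv track=rewrite | github.com/baptistecottier/advents-of-code | events/year_2024/day_12/day_12.py | get_region_morphology
-- ===== SOURCE A (Python) =====
-- def get_region_morphology(region: list[tuple[int, int]]) -> tuple[int, int, int]:
--     """
--     Given a region, this function returns area, length of the parameter,
--     and the number of corners. To find the perimeter length, for each point, we
--     check if its neighbours are in the region or not. If not, perimeter length is
--     incremented by one for each neighbour found to be not in the region. Then, based
--     on the corners patterns below, we can compute the numbers of corners.
--
--     Legend:
--         # - location in the region
--         . - location not in the region
--         ? - location that can be either in or out the region
--
--     (dx, dy) ||     (1, 0)     |     (0, 1)     |    (-1, 0)     |    (0, -1)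
--     ------------------------------------------------------------------------------
--     Group    ||  Outer  Inner  |  Outer  Inner  |  Outer  Inner  |  Outer  Inner
--     ------------------------------------------------------------------------------
--              ||   ?.?    ?##   |   ???    ???   |   ???    ???   |   ?.?    #.?
--     Pattern  ||   ?#.    ?#.   |   ?#.    ?##   |   .#?    .#?   |   .#?    ##?
--              ||   ???    ???   |   ?.?    ?.#   |   ?.?    ##?   |   ???    ???
--     """
--     corners = 0
--     length = 0
--
--     for (x, y) in region:
--         for dx, dy in ((1, 0), (0, 1), (-1, 0), (0, -1)):
--             if (x + dx, y + dy) not in region: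
--                 length += 1
--                 if (x + dy, y - dx) not in region:         # Outer corner
--                     corners += 1
--                 elif (x + dx + dy, y - dx + dy) in region:  # Inner corner
--                     corners += 1
--     return len(region), length, corners
-- ===== SOURCE B (Python) =====
-- ORTHO = ((1, 0), (0, 1), (-1, 0), (0, -1))
-- DIAG = ((1, 1), (1, -1), (-1, 1), (-1, -1))
--
--
-- def get_region_morphology(region: list[tuple[int, int]]) -> tuple[int, int, int]:
--     area = len(region)
--
--     perimeter = 0
--     for (x, y) in region:
--         for (dx, dy) in ORTHO:
--             if (x + dx, y + dy) not in region:
--                 perimeter += 1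
--
--     corners = 0
--     for (x, y) in region:
--         for (dx, dy) in DIAG:
--             a = (x + dx, y) in region
--             b = (x, y + dy) in region
--             c = (x + dx, y + dy) in region
--             if (not a and not b) or (a and b and not c):
--                 corners += 1
--
--     return area, perimeter, corners
-- ===== Notes on version B (the rewrite author's own statement) =====
-- stated objective: alternative
-- what changed: A fuses perimeter and corner counting into one pass with an edge-rotation outer/inner elif chain; B computes area as len, perimeter in its own pass, and corners by the standard diagonal method (convex: both orthogonal neighbours absent; concave: both present and the diagonal absent), which needs a global bijection argument to match A's edge-based scheme.
-- outside the precondition, e.g. on get_region_morphology([(0, 0), (1, 0), (0, 1), (0, 0)]): A returns (4, 10, 7), B returns (4, 10, 8)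
import Mathlib
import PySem

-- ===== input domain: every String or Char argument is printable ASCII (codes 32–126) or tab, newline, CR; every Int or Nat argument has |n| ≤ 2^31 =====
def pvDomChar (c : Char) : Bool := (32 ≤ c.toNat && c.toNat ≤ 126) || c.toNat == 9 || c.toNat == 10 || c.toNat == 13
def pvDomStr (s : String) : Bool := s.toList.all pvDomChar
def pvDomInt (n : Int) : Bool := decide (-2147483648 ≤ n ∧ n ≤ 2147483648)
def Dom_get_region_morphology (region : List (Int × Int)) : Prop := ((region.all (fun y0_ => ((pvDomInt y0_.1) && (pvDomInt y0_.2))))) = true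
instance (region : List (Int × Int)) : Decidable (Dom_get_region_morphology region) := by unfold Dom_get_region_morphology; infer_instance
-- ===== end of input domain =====

-- B restructures A: area = len(region); perimeter in its own pass; corners by the
-- diagonal convex/concave method instead of A's fused edge-rotation outer/inner chain.

-- ===== PORT A =====
-- the four (dx, dy) orthogonal directions of A's inner loop
def pvOrtho : List (Int × Int) := [(1, 0), (0, 1), (-1, 0), (0, -1)]

-- one step of A's inner loop: state is (corners, length)
def pvStepA (region : List (Int × Int)) (st : Int × Int) (p d : Int × Int) : Int × Int :=
  if (p.1 + d.1, p.2 + d.2) ∈ region then st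
  else
    if (p.1 + d.2, p.2 - d.1) ∉ region then (st.1 + 1, st.2 + 1)        -- Outer corner
    else if (p.1 + d.1 + d.2, p.2 - d.1 + d.2) ∈ region then (st.1 + 1, st.2 + 1)  -- Inner corner
    else (st.1, st.2 + 1)

def get_region_morphology (region : List (Int × Int)) : Int × Int × Int :=
  let st := region.foldl (fun st p => pvOrtho.foldl (fun st d => pvStepA region st p d) st) ((0 : Int), (0 : Int))
  ((region.length : Int), st.2, st.1)

-- ===== PORT B =====
-- the four (dx, dy) diagonal directions of B's corner loop
def pvDiag : List (Int × Int) := [(1, 1), (1, -1), (-1, 1), (-1, -1)]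

def get_region_morphology_alt (region : List (Int × Int)) : Int × Int × Int :=
  let area : Int := (region.length : Int)
  let perimeter : Int := region.foldl (fun acc p =>
    pvOrtho.foldl (fun acc d =>
      if (p.1 + d.1, p.2 + d.2) ∉ region then acc + 1 else acc) acc) 0
  let corners : Int := region.foldl (fun acc p =>
    pvDiag.foldl (fun acc d =>
      let a := (p.1 + d.1, p.2) ∈ region
      let b := (p.1, p.2 + d.2) ∈ region
      let c := (p.1 + d.1, p.2 + d.2) ∈ region
      if (¬a ∧ ¬b) ∨ (a ∧ b ∧ ¬c) then acc + 1 else acc) acc) 0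
  (area, perimeter, corners)

-- ===== PRECONDITION & SPEC =====
-- Pre_ excludes lists with duplicate cells: a region is a set of cells, and on duplicated
-- cells A's per-occurrence weighting of its edge-based corner scheme is accidental (B's
-- diagonal scheme weights occurrences differently, e.g. on [(0,0),(1,0),(0,1),(0,0)]).
def Pre_get_region_morphology (region : List (Int × Int)) : Prop := region.Nodup
instance (region : List (Int × Int)) : Decidable (Pre_get_region_morphology region) := by
  unfold Pre_get_region_morphology; infer_instance

def pvWitness_get_region_morphology : (List (Int × Int)) := [(0, 0), (1, 0), (0, 1)]

def Spec_get_region_morphology (region : List (Int × Int)) (out : Int × Int × Int) : Prop := out = get_region_morphology_alt region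
instance (region : List (Int × Int)) (out : Int × Int × Int) : Decidable (Spec_get_region_morphology region out) := by unfold Spec_get_region_morphology; infer_instance

-- ===== CLAIM (what is proved, stated in full; the proofs are below) =====
def Claim_equal_get_region_morphology : Prop := ∀ (region : List (Int × Int)), Dom_get_region_morphology region → Pre_get_region_morphology region → Spec_get_region_morphology region (get_region_morphology region)

-- ===== LEMMAS AND PROOFS =====

-- per-(cell, direction) indicator values (proof layer)
def pvLenInd (R : List (Int × Int)) (p d : Int × Int) : Int :=
  if (p.1 + d.1, p.2 + d.2) ∈ R then 0 else 1

def pvCornAInd (R : List (Int × Int)) (p d : Int × Int) : Int :=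
  if (p.1 + d.1, p.2 + d.2) ∈ R then 0
  else if (p.1 + d.2, p.2 - d.1) ∉ R then 1
  else if (p.1 + d.1 + d.2, p.2 - d.1 + d.2) ∈ R then 1
  else 0

def pvOutAInd (R : List (Int × Int)) (p d : Int × Int) : Int :=
  if (p.1 + d.1, p.2 + d.2) ∉ R ∧ (p.1 + d.2, p.2 - d.1) ∉ R then 1 else 0

def pvInnAInd (R : List (Int × Int)) (p d : Int × Int) : Int :=
  if (p.1 + d.1, p.2 + d.2) ∉ R ∧ (p.1 + d.2, p.2 - d.1) ∈ R ∧ (p.1 + d.1 + d.2, p.2 - d.1 + d.2) ∈ R then 1 else 0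

def pvCornBInd (R : List (Int × Int)) (p d : Int × Int) : Int :=
  if (¬((p.1 + d.1, p.2) ∈ R) ∧ ¬((p.1, p.2 + d.2) ∈ R)) ∨
     ((p.1 + d.1, p.2) ∈ R ∧ (p.1, p.2 + d.2) ∈ R ∧ ¬((p.1 + d.1, p.2 + d.2) ∈ R)) then 1 else 0

def pvOutBInd (R : List (Int × Int)) (p d : Int × Int) : Int :=
  if ¬((p.1 + d.1, p.2) ∈ R) ∧ ¬((p.1, p.2 + d.2) ∈ R) then 1 else 0

def pvConcBInd (R : List (Int × Int)) (p d : Int × Int) : Int :=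
  if (p.1 + d.1, p.2) ∈ R ∧ (p.1, p.2 + d.2) ∈ R ∧ ¬((p.1 + d.1, p.2 + d.2) ∈ R) then 1 else 0

-- per-cell sums
def pvLenCell (R : List (Int × Int)) (p : Int × Int) : Int := (pvOrtho.map (pvLenInd R p)).sum
def pvCornACell (R : List (Int × Int)) (p : Int × Int) : Int := (pvOrtho.map (pvCornAInd R p)).sum
def pvCornBCell (R : List (Int × Int)) (p : Int × Int) : Int := (pvDiag.map (pvCornBInd R p)).sum

theorem pvStepA_eq (R : List (Int × Int)) (st : Int × Int) (p d : Int × Int) :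
    pvStepA R st p d = (st.1 + pvCornAInd R p d, st.2 + pvLenInd R p d) := by
  unfold pvStepA pvCornAInd pvLenInd
  split_ifs <;> simp

theorem pvFoldA_eq (R : List (Int × Int)) : ∀ (l : List (Int × Int)) (st : Int × Int),
    l.foldl (fun st p => pvOrtho.foldl (fun st d => pvStepA R st p d) st) st
      = (st.1 + (l.map (pvCornACell R)).sum, st.2 + (l.map (pvLenCell R)).sum) := by
  intro l
  induction l with
  | nil => intro st; simp
  | cons p t ih =>
    intro st
    have hin : pvOrtho.foldl (fun st d => pvStepA R st p d) st
        = (st.1 + pvCornACell R p, st.2 + pvLenCell R p) := by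
      simp [pvOrtho, pvCornACell, pvLenCell, pvStepA_eq, Prod.ext_iff]
      constructor <;> ring
    simp only [List.foldl_cons, hin, ih, List.map_cons, List.sum_cons, Prod.mk.injEq]
    constructor <;> ring

theorem pvFoldPerim_eq (R : List (Int × Int)) : ∀ (l : List (Int × Int)) (a : Int),
    l.foldl (fun acc p => pvOrtho.foldl (fun acc d =>
        if (p.1 + d.1, p.2 + d.2) ∉ R then acc + 1 else acc) acc) a
      = a + (l.map (pvLenCell R)).sum := by
  intro l
  induction l with
  | nil => intro a; simp
  | cons p t ih =>
    intro a
    have hin : pvOrtho.foldl (fun acc d =>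
        if (p.1 + d.1, p.2 + d.2) ∉ R then acc + 1 else acc) a = a + pvLenCell R p := by
      simp [pvOrtho, pvLenCell, pvLenInd]
      split_ifs <;> ring
    simp only [List.foldl_cons, hin, ih, List.map_cons, List.sum_cons]
    ring

theorem pvFoldCornB_eq (R : List (Int × Int)) : ∀ (l : List (Int × Int)) (a : Int),
    l.foldl (fun acc p => pvDiag.foldl (fun acc d =>
        let a' := (p.1 + d.1, p.2) ∈ R
        let b := (p.1, p.2 + d.2) ∈ R
        let c := (p.1 + d.1, p.2 + d.2) ∈ R
        if (¬a' ∧ ¬b) ∨ (a' ∧ b ∧ ¬c) then acc + 1 else acc) acc) a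
      = a + (l.map (pvCornBCell R)).sum := by
  intro l
  induction l with
  | nil => intro a; simp
  | cons p t ih =>
    intro a
    have hin : ∀ a0 : Int, pvDiag.foldl (fun acc d =>
        let a' := (p.1 + d.1, p.2) ∈ R
        let b := (p.1, p.2 + d.2) ∈ R
        let c := (p.1 + d.1, p.2 + d.2) ∈ R
        if (¬a' ∧ ¬b) ∨ (a' ∧ b ∧ ¬c) then acc + 1 else acc) a0 = a0 + pvCornBCell R p := by
      intro a0
      simp [pvDiag, pvCornBCell, pvCornBInd]
      split_ifs <;> ring
    rw [List.foldl_cons, hin, ih]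
    simp only [List.map_cons, List.sum_cons]
    ring

-- decomposition of the indicators
theorem pvCornAInd_split (R : List (Int × Int)) (p d : Int × Int) :
    pvCornAInd R p d = pvOutAInd R p d + pvInnAInd R p d := by
  unfold pvCornAInd pvOutAInd pvInnAInd
  split_ifs <;> first | rfl | omega | tauto

theorem pvCornBInd_split (R : List (Int × Int)) (p d : Int × Int) :
    pvCornBInd R p d = pvOutBInd R p d + pvConcBInd R p d := by
  unfold pvCornBInd pvOutBInd pvConcBInd
  split_ifs <;> first | rfl | omega | tauto

-- the convex/outer corners agree cell by cell
theorem pvOut_cell_eq (R : List (Int × Int)) (p : Int × Int) :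
    (pvOrtho.map (pvOutAInd R p)).sum = (pvDiag.map (pvOutBInd R p)).sum := by
  obtain ⟨x, y⟩ := p
  simp only [pvOrtho, pvDiag, List.map_cons, List.map_nil, List.sum_cons, List.sum_nil,
    pvOutAInd, pvOutBInd]
  norm_num
  by_cases h1 : (x + 1, y) ∈ R <;> by_cases h2 : (x, y + 1) ∈ R <;>
    by_cases h3 : (x + -1, y) ∈ R <;> by_cases h4 : (x, y + -1) ∈ R <;>
    simp [h1, h2, h3, h4, and_comm, sub_eq_add_neg]

-- the inner/concave corners agree globally: bijection over (cell, direction) pairs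
def pvPhi : (Int × Int) × (Int × Int) → (Int × Int) × (Int × Int) :=
  fun pd => ((pd.1.1 + pd.2.2, pd.1.2 - pd.2.1), (pd.2.1 - pd.2.2, pd.2.1 + pd.2.2))

def pvPsi : (Int × Int) × (Int × Int) → (Int × Int) × (Int × Int) :=
  fun qd =>
    if qd.2 = (1, 1) then ((qd.1.1, qd.1.2 + 1), (1, 0))
    else if qd.2 = (-1, 1) then ((qd.1.1 - 1, qd.1.2), (0, 1))
    else if qd.2 = (-1, -1) then ((qd.1.1, qd.1.2 - 1), (-1, 0))
    else ((qd.1.1 + 1, qd.1.2), (0, -1))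

def pvPA (R : List (Int × Int)) (pd : (Int × Int) × (Int × Int)) : Bool :=
  decide ((pd.1.1 + pd.2.1, pd.1.2 + pd.2.2) ∉ R ∧ (pd.1.1 + pd.2.2, pd.1.2 - pd.2.1) ∈ R ∧
    (pd.1.1 + pd.2.1 + pd.2.2, pd.1.2 - pd.2.1 + pd.2.2) ∈ R)

def pvPB (R : List (Int × Int)) (pd : (Int × Int) × (Int × Int)) : Bool :=
  decide ((pd.1.1 + pd.2.1, pd.1.2) ∈ R ∧ (pd.1.1, pd.1.2 + pd.2.2) ∈ R ∧
    (pd.1.1 + pd.2.1, pd.1.2 + pd.2.2) ∉ R)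

theorem pvInnAInd_boole (R : List (Int × Int)) (p d : Int × Int) :
    pvInnAInd R p d = if pvPA R (p, d) = true then (1 : Int) else 0 := by
  simp [pvInnAInd, pvPA]

theorem pvConcBInd_boole (R : List (Int × Int)) (p d : Int × Int) :
    pvConcBInd R p d = if pvPB R (p, d) = true then (1 : Int) else 0 := by
  simp [pvConcBInd, pvPB]

theorem pvPhi_mapsTo (R : List (Int × Int)) :
    Set.MapsTo pvPhi ((R.toFinset ×ˢ pvOrtho.toFinset).filter (fun pd => pvPA R pd = true))
      ((R.toFinset ×ˢ pvDiag.toFinset).filter (fun pd => pvPB R pd = true)) := by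
  rintro ⟨⟨x, y⟩, ⟨dx, dy⟩⟩ h
  simp only [Finset.coe_filter, Set.mem_setOf_eq, Finset.mem_product,
    List.mem_toFinset] at h ⊢
  obtain ⟨⟨hp, hd⟩, hPA⟩ := h
  simp only [pvOrtho, List.mem_cons, List.not_mem_nil, or_false, Prod.mk.injEq] at hd
  rcases hd with ⟨h1, h2⟩ | ⟨h1, h2⟩ | ⟨h1, h2⟩ | ⟨h1, h2⟩ <;> subst h1 <;> subst h2 <;>
    simp only [pvPA, pvPhi, pvPB, pvDiag] at hPA ⊢ <;> norm_num at hPA ⊢ <;>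
    tauto

theorem pvPsi_mapsTo (R : List (Int × Int)) :
    Set.MapsTo pvPsi ((R.toFinset ×ˢ pvDiag.toFinset).filter (fun pd => pvPB R pd = true))
      ((R.toFinset ×ˢ pvOrtho.toFinset).filter (fun pd => pvPA R pd = true)) := by
  rintro ⟨⟨x, y⟩, ⟨dx, dy⟩⟩ h
  simp only [Finset.coe_filter, Set.mem_setOf_eq, Finset.mem_product,
    List.mem_toFinset] at h ⊢
  obtain ⟨⟨hp, hd⟩, hPB⟩ := h
  simp only [pvDiag, List.mem_cons, List.not_mem_nil, or_false, Prod.mk.injEq] at hd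
  rcases hd with ⟨h1, h2⟩ | ⟨h1, h2⟩ | ⟨h1, h2⟩ | ⟨h1, h2⟩ <;> subst h1 <;> subst h2 <;>
    simp only [pvPB, pvPsi, pvPA, pvOrtho] at hPB ⊢ <;> norm_num at hPB ⊢ <;>
    tauto

theorem pvPsiPhi (R : List (Int × Int)) :
    Set.LeftInvOn pvPsi pvPhi ((R.toFinset ×ˢ pvOrtho.toFinset).filter (fun pd => pvPA R pd = true)) := by
  rintro ⟨⟨x, y⟩, ⟨dx, dy⟩⟩ h
  simp only [Finset.coe_filter, Set.mem_setOf_eq, Finset.mem_product,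
    List.mem_toFinset] at h
  obtain ⟨⟨hp, hd⟩, _⟩ := h
  simp only [pvOrtho, List.mem_cons, List.not_mem_nil, or_false, Prod.mk.injEq] at hd
  rcases hd with ⟨h1, h2⟩ | ⟨h1, h2⟩ | ⟨h1, h2⟩ | ⟨h1, h2⟩ <;> subst h1 <;> subst h2 <;>
    simp [pvPhi, pvPsi]

theorem pvPhiPsi (R : List (Int × Int)) :
    Set.RightInvOn pvPsi pvPhi ((R.toFinset ×ˢ pvDiag.toFinset).filter (fun pd => pvPB R pd = true)) := by
  rintro ⟨⟨x, y⟩, ⟨dx, dy⟩⟩ h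
  simp only [Finset.coe_filter, Set.mem_setOf_eq, Finset.mem_product,
    List.mem_toFinset] at h
  obtain ⟨⟨hp, hd⟩, _⟩ := h
  simp only [pvDiag, List.mem_cons, List.not_mem_nil, or_false, Prod.mk.injEq] at hd
  rcases hd with ⟨h1, h2⟩ | ⟨h1, h2⟩ | ⟨h1, h2⟩ | ⟨h1, h2⟩ <;> subst h1 <;> subst h2 <;>
    simp [pvPhi, pvPsi]

theorem pvInn_global_eq (R : List (Int × Int)) (hR : R.Nodup) :
    (R.map (fun p => (pvOrtho.map (pvInnAInd R p)).sum)).sum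
      = (R.map (fun p => (pvDiag.map (pvConcBInd R p)).sum)).sum := by
  have hO : pvOrtho.Nodup := by decide
  have hD : pvDiag.Nodup := by decide
  have hsum : ∀ (l : List (Int × Int)), l.Nodup →
      ∀ (P : (Int × Int) × (Int × Int) → Bool)
        (ind : (Int × Int) → (Int × Int) → Int),
      (∀ p d, ind p d = if P (p, d) = true then (1 : Int) else 0) →
      (R.map (fun p => (l.map (ind p)).sum)).sum
        = (((R.toFinset ×ˢ l.toFinset).filter (fun pd => P pd = true)).card : Int) := by
    intro l hl P ind hind
    rw [← List.sum_toFinset _ hR]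
    have h1 : ∀ p, (l.map (ind p)).sum
        = ∑ d ∈ l.toFinset, if P (p, d) = true then (1 : Int) else 0 := by
      intro p
      rw [← List.sum_toFinset _ hl]
      exact Finset.sum_congr rfl fun d _ => hind p d
    rw [Finset.sum_congr rfl fun p _ => h1 p, ← Finset.sum_product']
    simp
  rw [hsum pvOrtho hO (pvPA R) (pvInnAInd R) (pvInnAInd_boole R),
    hsum pvDiag hD (pvPB R) (pvConcBInd R) (pvConcBInd_boole R)]
  exact congrArg _ (Finset.card_nbij' pvPhi pvPsi (pvPhi_mapsTo R) (pvPsi_mapsTo R)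
    (pvPsiPhi R) (pvPhiPsi R))

-- assembling the per-cell corner sums
theorem pvCorn_global_eq (R : List (Int × Int)) (hR : R.Nodup) :
    (R.map (pvCornACell R)).sum = (R.map (pvCornBCell R)).sum := by
  have hA : ∀ p, pvCornACell R p
      = (pvOrtho.map (pvOutAInd R p)).sum + (pvOrtho.map (pvInnAInd R p)).sum := by
    intro p
    simp [pvCornACell, pvCornAInd_split, pvOrtho]
    ring
  have hB : ∀ p, pvCornBCell R p
      = (pvDiag.map (pvOutBInd R p)).sum + (pvDiag.map (pvConcBInd R p)).sum := by
    intro p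
    simp [pvCornBCell, pvCornBInd_split, pvDiag]
    ring
  have hsplit : ∀ (f g : (Int × Int) → Int) (l : List (Int × Int)),
      (l.map (fun p => f p + g p)).sum = (l.map f).sum + (l.map g).sum := by
    intro f g l
    induction l with
    | nil => simp
    | cons p t ih => simp [ih]; ring
  calc (R.map (pvCornACell R)).sum
      = (R.map (fun p => (pvOrtho.map (pvOutAInd R p)).sum
          + (pvOrtho.map (pvInnAInd R p)).sum)).sum :=
        congrArg List.sum (List.map_congr_left fun p _ => hA p)
    _ = (R.map (fun p => (pvOrtho.map (pvOutAInd R p)).sum)).sum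
          + (R.map (fun p => (pvOrtho.map (pvInnAInd R p)).sum)).sum := hsplit _ _ _
    _ = (R.map (fun p => (pvDiag.map (pvOutBInd R p)).sum)).sum
          + (R.map (fun p => (pvDiag.map (pvConcBInd R p)).sum)).sum := by
        rw [pvInn_global_eq R hR]
        congr 1
        exact congrArg _ (List.map_congr_left (fun p _ => pvOut_cell_eq R p))
    _ = (R.map (fun p => (pvDiag.map (pvOutBInd R p)).sum
          + (pvDiag.map (pvConcBInd R p)).sum)).sum := (hsplit _ _ _).symm
    _ = (R.map (pvCornBCell R)).sum :=
        (congrArg List.sum (List.map_congr_left fun p _ => hB p)).symm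

-- ===== VERDICT (by name: the statement is the Claim_ definition above) =====
theorem get_region_morphology_spec : Claim_equal_get_region_morphology := by
  intro region _ hpre
  unfold Spec_get_region_morphology get_region_morphology get_region_morphology_alt
  simp only [pvFoldA_eq, pvFoldPerim_eq, pvFoldCornB_eq]
  refine congrArg _ ?_
  refine congrArg₂ _ ?_ ?_
  · ring
  · simpa using pvCorn_global_eq region hpre
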